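-- pv_equiv track=rewrite | github.com/OxQuasar/nous-memories | iching/fibo/compute_all.py | gaussian_binomial
-- ===== SOURCE A (Python) =====
-- def gaussian_binomial(n, k, q=2):
--     """Compute [n choose k]_q (Gaussian binomial coefficient)."""
--     if k < 0 or k > n:
--         return 0
--     if k == 0 or k == n:
--         return 1
--     num = 1
--     den = 1
--     for i in range(k):
--         num *= (q**(n - i) - 1)
--         den *= (q**(i + 1) - 1)
--     return num // den
-- ===== SOURCE B (Python) =====
-- def _prod(xs):
--     """Balanced (divide-and-conquer) product of a nonempty list."""
--     if len(xs) == 1: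
--         return xs[0]
--     m = len(xs) // 2
--     return _prod(xs[:m]) * _prod(xs[m:])
--
--
-- def gaussian_binomial(n, k, q=2):
--     """Compute [n choose k]_q using the symmetry [n,k]_q = [n,n-k]_q to take
--     r = min(k, n-k) factors, built as two staged lists and multiplied by a
--     balanced divide-and-conquer product, with one final exact division."""
--     if k < 0 or k > n:
--         return 0
--     if k == 0 or k == n:
--         return 1
--     r = min(k, n - k)
--     num = [q ** (n - i) - 1 for i in range(r)]
--     den = [q ** (i + 1) - 1 for i in range(r)]
--     return _prod(num) // _prod(den)
-- ===== Notes on version B (the rewrite author's own statement) =====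
-- stated objective: alternative
-- what changed: B replaces A's fused loop that accumulates the full numerator and denominator factor by factor with a staged pipeline: it first shrinks the problem via the symmetry [n,k]_q = [n,n-k]_q to r = min(k, n-k) factors, builds the two factor lists, multiplies each with a balanced divide-and-conquer product, and divides once.
import Mathlib
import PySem

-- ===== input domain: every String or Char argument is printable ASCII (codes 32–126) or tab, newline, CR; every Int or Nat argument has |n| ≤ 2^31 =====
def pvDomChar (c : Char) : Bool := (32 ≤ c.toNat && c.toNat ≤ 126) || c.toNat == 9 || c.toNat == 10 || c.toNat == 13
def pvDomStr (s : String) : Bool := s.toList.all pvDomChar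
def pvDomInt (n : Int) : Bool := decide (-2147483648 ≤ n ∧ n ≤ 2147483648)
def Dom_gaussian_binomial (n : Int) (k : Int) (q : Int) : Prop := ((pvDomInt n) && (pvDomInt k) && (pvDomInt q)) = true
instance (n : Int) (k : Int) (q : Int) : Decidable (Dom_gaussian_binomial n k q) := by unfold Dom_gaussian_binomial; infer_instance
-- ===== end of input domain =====

-- B shrinks to r = min(k, n-k) factors via the symmetry [n,k]_q = [n,n-k]_q and multiplies them with a balanced divide-and-conquer product (objective: alternative).

-- ===== PORT A =====
-- q**e is ported as q ^ e.toNat: exact here, since every exponent reached in the executed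
-- branch (0 < k < n, i < k) is positive.
def gaussian_binomial (n : Int) (k : Int) (q : Int) : Int :=
  if k < 0 ∨ k > n then 0
  else if k = 0 ∨ k = n then 1
  else
    let p := (PySem.List.pyRange 0 k 1).foldl
      (fun (s : Int × Int) i => (s.1 * (q ^ (n - i).toNat - 1), s.2 * (q ^ (i + 1).toNat - 1)))
      (1, 1)
    PySem.Int.floordiv p.1 p.2

-- ===== PORT B =====
-- balanced divide-and-conquer product of a nonempty list, recursing on the list length
-- as structural fuel (a totality guard only: the recursion depth never exceeds the length;
-- Python recurses forever on [], which is unreachable from the caller).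
-- xs[:m] / xs[m:] with 0 ≤ m ≤ len xs are exactly take/drop (PySem.List.slice_to/slice_from).
def prodDCAux : Nat → List Int → Int
  | 0, _ => 1
  | fuel+1, xs =>
    if xs.length = 1 then xs.headD 1
    else if xs.length = 0 then 1
    else prodDCAux fuel (xs.take (xs.length / 2)) * prodDCAux fuel (xs.drop (xs.length / 2))

def prodDC (xs : List Int) : Int := prodDCAux xs.length xs

-- q**e ported as q ^ e.toNat (every exponent in the executed branch is positive)
def gaussian_binomial_alt (n : Int) (k : Int) (q : Int) : Int :=
  if k < 0 ∨ k > n then 0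
  else if k = 0 ∨ k = n then 1
  else
    let r := min k (n - k)
    let num := (PySem.List.pyRange 0 r 1).map (fun i => q ^ (n - i).toNat - 1)
    let den := (PySem.List.pyRange 0 r 1).map (fun i => q ^ (i + 1).toNat - 1)
    PySem.Int.floordiv (prodDC num) (prodDC den)

-- ===== PRECONDITION & SPEC =====
-- Pre_ excludes exactly the inputs on which A raises ZeroDivisionError: its denominator
-- product contains a factor q^i - 1 = 0 iff 0 < k < n and (q = 1, or q = -1 with k ≥ 2).
def Pre_gaussian_binomial (n : Int) (k : Int) (q : Int) : Prop :=
  ¬ (0 < k ∧ k < n ∧ (q = 1 ∨ (q = -1 ∧ 2 ≤ k)))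
instance (n : Int) (k : Int) (q : Int) : Decidable (Pre_gaussian_binomial n k q) := by
  unfold Pre_gaussian_binomial; infer_instance

def pvWitness_gaussian_binomial : Int × Int × Int := (4, 2, 2)

def Spec_gaussian_binomial (n : Int) (k : Int) (q : Int) (out : Int) : Prop :=
  out = gaussian_binomial_alt n k q
instance (n : Int) (k : Int) (q : Int) (out : Int) : Decidable (Spec_gaussian_binomial n k q out) := by
  unfold Spec_gaussian_binomial; infer_instance

-- ===== CLAIM (what is proved, stated in full; the proofs are below) =====
def Claim_equal_gaussian_binomial : Prop := ∀ (n : Int) (k : Int) (q : Int), Dom_gaussian_binomial n k q → Pre_gaussian_binomial n k q → Spec_gaussian_binomial n k q (gaussian_binomial n k q)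


-- ===== LEMMAS AND PROOFS =====

-- the mathematical q-Pascal recursion
def gB (q : Int) : Nat → Nat → Int
  | _, 0 => 1
  | 0, _+1 => 0
  | n+1, k+1 => gB q n k + q ^ (k+1) * gB q n (k+1)

-- A's numerator and denominator products
def Np (q : Int) (n : Nat) : Nat → Int
  | 0 => 1
  | t+1 => Np q n t * (q ^ (n - t) - 1)

def Dp (q : Int) : Nat → Int
  | 0 => 1
  | t+1 => Dp q t * (q ^ (t+1) - 1)

lemma gB_zero_right (q : Int) (n : Nat) : gB q n 0 = 1 := by cases n <;> rfl

lemma gB_of_lt (q : Int) : ∀ n k : Nat, n < k → gB q n k = 0 := by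
  intro n
  induction n with
  | zero => intro k hk; cases k with | zero => omega | succ t => rfl
  | succ n ih =>
    intro k hk
    cases k with
    | zero => omega
    | succ t =>
      show gB q n t + q ^ (t+1) * gB q n (t+1) = 0
      rw [ih t (by omega), ih (t+1) (by omega)]; ring

lemma Np_shift (q : Int) (n : Nat) : ∀ k : Nat, Np q (n+1) (k+1) = (q ^ (n+1) - 1) * Np q n k := by
  intro k
  induction k with
  | zero => show (1 : Int) * (q ^ (n+1) - 1) = (q ^ (n+1) - 1) * 1; ring
  | succ t ih =>
    show Np q (n+1) (t+1) * (q ^ (n+1-(t+1)) - 1) = (q ^ (n+1) - 1) * (Np q n t * (q ^ (n - t) - 1))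
    rw [ih, Nat.succ_sub_succ]; ring

lemma Np_zero_of_lt (q : Int) (n : Nat) : ∀ k : Nat, n < k → Np q n k = 0 := by
  intro k
  induction k with
  | zero => omega
  | succ t ih =>
    intro h
    show Np q n t * (q ^ (n - t) - 1) = 0
    rcases Nat.lt_or_ge n t with h' | h'
    · rw [ih h']; ring
    · have : n - t = 0 := by omega
      rw [this]; simp

lemma Np_eq_Dp_mul_gB (q : Int) : ∀ n k : Nat, Np q n k = Dp q k * gB q n k := by
  intro n
  induction n with
  | zero =>
    intro k
    cases k with
    | zero => rfl
    | succ t => rw [Np_zero_of_lt q 0 (t+1) (by omega), gB_of_lt q 0 (t+1) (by omega)]; ring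
  | succ n ih =>
    intro k
    cases k with
    | zero => simp [Np, Dp, gB_zero_right]
    | succ t =>
      have hgB : gB q (n+1) (t+1) = gB q n t + q ^ (t+1) * gB q n (t+1) := rfl
      have hDp : Dp q (t+1) = Dp q t * (q ^ (t+1) - 1) := rfl
      rw [Np_shift, hgB, hDp]
      rcases Nat.lt_or_ge n t with h' | h'
      · rw [gB_of_lt q n t h', gB_of_lt q n (t+1) (by omega),
            Np_zero_of_lt q n t h']
        ring
      · have h1 : Np q n (t+1) = Np q n t * (q ^ (n - t) - 1) := rfl
        have hpow : q ^ (t+1) * q ^ (n - t) = q ^ (n+1) := by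
          rw [← pow_add]; congr 1; omega
        have e : (q ^ (n+1) - 1) * Np q n t
            = (q ^ (t+1) - 1) * Np q n t + q ^ (t+1) * Np q n (t+1) := by
          rw [h1, ← hpow]; ring
        rw [e, ih t, ih (t+1), hDp]; ring

lemma pow_ne_one_int (q : Int) (i : Nat) (hq1 : q ≠ 1) (hqm1 : q ≠ -1) (hi : i ≠ 0) :
    q ^ i ≠ 1 := by
  intro h
  have hu : IsUnit q := IsUnit.of_pow_eq_one h hi
  rcases Int.isUnit_iff.mp hu with h' | h' <;> simp_all

lemma Dp_ne_zero (q : Int) (k : Nat) (hq1 : q ≠ 1) (hqm1 : q = -1 → k ≤ 1) : Dp q k ≠ 0 := by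
  by_cases hm : q = -1
  · have hk : k ≤ 1 := hqm1 hm
    interval_cases k
    · simp [Dp]
    · simp [Dp, hm]
  · induction k with
    | zero => simp [Dp]
    | succ t ih =>
      show Dp q t * (q ^ (t+1) - 1) ≠ 0
      have h2 := pow_ne_one_int q (t+1) hq1 hm (by omega)
      exact mul_ne_zero (ih (by omega)) (by omega)

-- A's loop computes (Np, Dp)
lemma A_fold (n q : Int) : ∀ t : Nat, t ≤ n.toNat →
    (PySem.List.pyRange 0 (t : Int) 1).foldl
      (fun (s : Int × Int) i => (s.1 * (q ^ (n - i).toNat - 1), s.2 * (q ^ (i + 1).toNat - 1)))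
      (1, 1) = (Np q n.toNat t, Dp q t) := by
  intro t
  induction t with
  | zero => intro _; rfl
  | succ t ih =>
    intro ht
    rw [show ((t+1 : Nat) : Int) = ((t : Nat) : Int) + 1 by omega,
        PySem.List.pyRange_one_succ_right (by positivity), List.foldl_append, ih (by omega)]
    have h1 : (n - (t : Int)).toNat = n.toNat - t := by omega
    have h2 : ((t : Int) + 1).toNat = t + 1 := by omega
    simp only [List.foldl, h1, h2]
    rfl

-- the balanced product is the list product (on nonempty lists)
lemma prodDCAux_eq_prod : ∀ (fuel : Nat) (xs : List Int), xs.length ≤ fuel → xs ≠ [] →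
    prodDCAux fuel xs = xs.prod := by
  intro fuel
  induction fuel with
  | zero =>
    intro xs h hne
    exact absurd (List.length_eq_zero_iff.mp (by omega)) hne
  | succ f ih =>
    intro xs h hne
    show (if xs.length = 1 then xs.headD 1
      else if xs.length = 0 then 1
      else prodDCAux f (xs.take (xs.length / 2)) * prodDCAux f (xs.drop (xs.length / 2)))
      = xs.prod
    have h0 : xs.length ≠ 0 := fun hc => hne (List.length_eq_zero_iff.mp hc)
    by_cases h1 : xs.length = 1
    · obtain ⟨a, rfl⟩ := List.length_eq_one_iff.mp h1
      simp
    · simp only [h1, h0, if_false]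
      rw [ih _ (by simp only [List.length_take]; omega)
            (by simp only [← List.length_pos_iff, List.length_take]; omega),
          ih _ (by simp only [List.length_drop]; omega)
            (by simp only [← List.length_pos_iff, List.length_drop]; omega),
          List.prod_take_mul_prod_drop]

lemma prodDC_eq_prod (xs : List Int) (h : xs ≠ []) : prodDC xs = xs.prod :=
  prodDCAux_eq_prod xs.length xs le_rfl h

-- B's numerator factor list multiplies out to Np
lemma prod_num (n q : Int) : ∀ t : Nat, t ≤ n.toNat →
    ((PySem.List.pyRange 0 (t : Int) 1).map (fun i => q ^ (n - i).toNat - 1)).prod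
      = Np q n.toNat t := by
  intro t
  induction t with
  | zero => intro _; rfl
  | succ t ih =>
    intro ht
    rw [show ((t+1 : Nat) : Int) = ((t : Nat) : Int) + 1 by omega,
        PySem.List.pyRange_one_succ_right (by positivity), List.map_append, List.prod_append,
        ih (by omega)]
    have h1 : (n - (t : Int)).toNat = n.toNat - t := by omega
    simp only [List.map_cons, List.map_nil, List.prod_cons, List.prod_nil, h1, mul_one]
    rfl

-- B's denominator factor list multiplies out to Dp
lemma prod_den (q : Int) : ∀ t : Nat,
    ((PySem.List.pyRange 0 (t : Int) 1).map (fun i => q ^ (i + 1).toNat - 1)).prod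
      = Dp q t := by
  intro t
  induction t with
  | zero => rfl
  | succ t ih =>
    rw [show ((t+1 : Nat) : Int) = ((t : Nat) : Int) + 1 by omega,
        PySem.List.pyRange_one_succ_right (by positivity), List.map_append, List.prod_append,
        ih]
    have h2 : ((t : Int) + 1).toNat = t + 1 := by omega
    simp only [List.map_cons, List.map_nil, List.prod_cons, List.prod_nil, h2, mul_one]
    rfl

-- ∏_{j=N-K+1..N}(q^j-1) times ∏_{j=1..N-K}(q^j-1) is the full product ∏_{j=1..N}(q^j-1)
lemma Dp_mul_Np (q : Int) (N : Nat) : ∀ K : Nat, K ≤ N → Dp q (N - K) * Np q N K = Dp q N := by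
  intro K
  induction K with
  | zero => intro _; simp [Np]
  | succ t ih =>
    intro ht
    have e1 : N - t = (N - (t+1)) + 1 := by omega
    have e2 : N - t = N - (t+1) + 1 := by omega
    have hD : Dp q (N - t) = Dp q (N - (t+1)) * (q ^ (N - (t+1) + 1) - 1) := by
      rw [e1]; rfl
    have hN : Np q N (t+1) = Np q N t * (q ^ (N - t) - 1) := rfl
    have := ih (by omega)
    rw [hN, ← this, hD, e2]
    ring

-- symmetry [N,K]_q = [N,N-K]_q, by cancelling the nonzero denominators
lemma gB_symm (q : Int) (N K : Nat) (hK : K ≤ N)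
    (h1 : Dp q K ≠ 0) (h2 : Dp q (N - K) ≠ 0) : gB q N K = gB q N (N - K) := by
  apply mul_left_cancel₀ (mul_ne_zero h1 h2)
  calc Dp q K * Dp q (N - K) * gB q N K
      = Dp q (N - K) * (Dp q K * gB q N K) := by ring
    _ = Dp q (N - K) * Np q N K := by rw [← Np_eq_Dp_mul_gB]
    _ = Dp q N := Dp_mul_Np q N K hK
    _ = Dp q (N - (N - K)) * Np q N (N - K) := by
        rw [Dp_mul_Np q N (N - K) (by omega)]
    _ = Dp q K * Dp q (N - K) * gB q N (N - K) := by
        rw [show N - (N - K) = K by omega, Np_eq_Dp_mul_gB]; ring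

-- ===== VERDICT (by name: the statement is the Claim_ definition above) =====
theorem gaussian_binomial_spec : Claim_equal_gaussian_binomial := by
  intro n k q _ hpre
  unfold Spec_gaussian_binomial gaussian_binomial gaussian_binomial_alt
  by_cases h1 : k < 0 ∨ k > n
  · simp [h1]
  · simp only [h1, if_false]
    by_cases h2 : k = 0 ∨ k = n
    · simp [h2]
    · simp only [h2, if_false]
      have hk0 : 0 < k := by omega
      have hkn : k < n := by omega
      have hq : ¬ (q = 1 ∨ (q = -1 ∧ 2 ≤ k)) := fun hc => hpre ⟨hk0, hkn, hc⟩
      have hkk : ((k.toNat : Nat) : Int) = k := by omega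
      have hnn : ((n.toNat : Nat) : Int) = n := by omega
      -- A's side
      have hA := A_fold n q k.toNat (by omega)
      rw [hkk] at hA
      rw [hA]
      -- B's side
      have hq1 : q ≠ 1 := fun hc => hq (Or.inl hc)
      have hne : ∀ (f : Int → Int) (x : Int), 0 < x →
          ((PySem.List.pyRange 0 x 1).map f) ≠ [] := by
        intro f x hx
        apply List.ne_nil_of_length_pos
        rw [List.length_map, PySem.List.length_pyRange_one]
        omega
      by_cases hle : k ≤ n - k
      · rw [min_eq_left hle,
            prodDC_eq_prod _ (hne _ k (by omega)), prodDC_eq_prod _ (hne _ k (by omega)),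
            ← hkk, prod_num n q k.toNat (by omega), prod_den q k.toNat]
        simp only [Int.toNat_natCast]
      · have hqm1 : q ≠ -1 := fun hc => hq (Or.inr ⟨hc, by omega⟩)
        have hRn : (((n - k).toNat : Nat) : Int) = n - k := by omega
        rw [min_eq_right (by omega),
            prodDC_eq_prod _ (hne _ (n - k) (by omega)),
            prodDC_eq_prod _ (hne _ (n - k) (by omega)),
            ← hRn, prod_num n q (n - k).toNat (by omega), prod_den q (n - k).toNat]
        have hdK : Dp q k.toNat ≠ 0 := Dp_ne_zero q k.toNat hq1 (fun hc => absurd hc hqm1)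
        have hdR : Dp q (n - k).toNat ≠ 0 :=
          Dp_ne_zero q (n - k).toNat hq1 (fun hc => absurd hc hqm1)
        have hR : (n - k).toNat = n.toNat - k.toNat := by omega
        have eA : PySem.Int.floordiv (Np q n.toNat k.toNat) (Dp q k.toNat)
            = gB q n.toNat k.toNat := by
          rw [Np_eq_Dp_mul_gB]; exact Int.mul_fdiv_cancel_left _ hdK
        have eB : PySem.Int.floordiv (Np q n.toNat (n - k).toNat) (Dp q (n - k).toNat)
            = gB q n.toNat (n - k).toNat := by
          rw [Np_eq_Dp_mul_gB]; exact Int.mul_fdiv_cancel_left _ hdR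
        rw [eA, eB, hR]
        exact gB_symm q n.toNat k.toNat (by omega) hdK (hR ▸ hdR)
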